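-- pv_equiv track=rewrite | github.com/vgcman16/Reverser | src/reverser/analysis/conquer_animation.py | _compute_longest_run
-- ===== SOURCE A (Python) =====
-- def _compute_longest_run(indices: list[int]) -> int:
--     if not indices:
--         return 0
--     longest = 1
--     current = 1
--     for previous, current_value in zip(indices, indices[1:]):
--         if current_value == previous + 1:
--             current += 1
--         else:
--             longest = max(longest, current)
--             current = 1
--     return max(longest, current)
-- ===== SOURCE B (Python) =====
-- def _compute_longest_run(indices: list[int]) -> int:
--     n = len(indices)
--     if n == 0:
--         return 0
--     # positions where a new run starts are recorded as break points;
--     # the answer is the largest gap between consecutive boundaries.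
--     breaks = [j for j, (p, c) in enumerate(zip(indices, indices[1:]), 1) if c != p + 1]
--     bounds = [0] + breaks + [n]
--     return max(b - a for a, b in zip(bounds, bounds[1:]))
-- ===== Notes on version B (the rewrite author's own statement) =====
-- stated objective: alternative
-- what changed: B replaces A's running-counter/reset accumulator with a boundary computation: it collects the positions where a run breaks, forms the list of boundaries (zero, the break positions, the length), and returns the maximum gap between consecutive boundaries.
import Mathlib
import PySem

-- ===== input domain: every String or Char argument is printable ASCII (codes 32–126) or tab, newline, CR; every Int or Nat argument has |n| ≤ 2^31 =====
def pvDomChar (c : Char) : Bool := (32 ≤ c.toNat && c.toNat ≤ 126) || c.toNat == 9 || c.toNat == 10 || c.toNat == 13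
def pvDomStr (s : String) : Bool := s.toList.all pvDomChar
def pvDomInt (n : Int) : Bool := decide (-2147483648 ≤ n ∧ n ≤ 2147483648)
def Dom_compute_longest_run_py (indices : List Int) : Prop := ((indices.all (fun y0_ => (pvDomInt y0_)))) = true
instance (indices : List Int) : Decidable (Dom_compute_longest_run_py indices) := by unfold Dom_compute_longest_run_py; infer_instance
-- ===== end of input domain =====

-- B computes the longest run as the largest gap between run boundaries instead of A's running counter; same O(n) cost.

-- ===== PORT A =====
def compute_longest_run_py (indices : List Int) : Int :=
  if indices = [] then 0
  else
    let st := (indices.zip (PySem.List.slice indices (some 1) none)).foldl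
      (fun (st : Int × Int) pc =>
        if pc.2 = pc.1 + 1 then (st.1, st.2 + 1) else (max st.1 st.2, 1))
      (1, 1)
    max st.1 st.2

-- ===== PORT B =====
def compute_longest_run_py_alt (indices : List Int) : Int :=
  let n : Int := indices.length
  if n = 0 then 0
  else
    let breaks := (PySem.List.enumerate (indices.zip (PySem.List.slice indices (some 1) none)) 1).filterMap
      (fun je => if je.2.2 ≠ je.2.1 + 1 then some je.1 else none)
    let bounds := 0 :: (breaks ++ [n])
    let gaps := (bounds.zip (PySem.List.slice bounds (some 1) none)).map (fun ab => ab.2 - ab.1)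
    match gaps with
    | [] => 0        -- unreachable: bounds always has at least two elements
    | g :: gs => gs.foldl max g

-- ===== PRECONDITION & SPEC =====
def Spec_compute_longest_run_py (indices : List Int) (out : Int) : Prop := out = compute_longest_run_py_alt indices
instance (indices : List Int) (out : Int) : Decidable (Spec_compute_longest_run_py indices out) := by unfold Spec_compute_longest_run_py; infer_instance

-- ===== CLAIM (what is proved, stated in full; the proofs are below) =====
def Claim_equal_compute_longest_run_py : Prop := ∀ (indices : List Int), Dom_compute_longest_run_py indices → Spec_compute_longest_run_py indices (compute_longest_run_py indices)

-- ===== LEMMAS AND PROOFS =====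

/-- `(first gap, remaining gaps)` of the run decomposition of a pair list. -/
def gpRun : List (Int × Int) → Int × List Int
  | [] => (1, [])
  | pc :: rest =>
      let r := gpRun rest
      if pc.2 = pc.1 + 1 then (r.1 + 1, r.2) else (1, r.1 :: r.2)

/-- consecutive differences -/
def diffs : List Int → List Int
  | a :: b :: l => (b - a) :: diffs (b :: l)
  | _ => []

def breaksOf (s : Int) (p : List (Int × Int)) : List Int :=
  (PySem.List.enumerate p s).filterMap (fun je => if je.2.2 ≠ je.2.1 + 1 then some je.1 else none)

theorem zip_diffs (l : List Int) :
    (l.zip l.tail).map (fun ab : Int × Int => ab.2 - ab.1) = diffs l := by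
  match l with
  | [] => rfl
  | [a] => rfl
  | a :: b :: r =>
    simp only [List.tail_cons, List.zip_cons_cons, List.map_cons, diffs]
    exact congrArg _ (zip_diffs (b :: r))

theorem breaksOf_nil (s : Int) : breaksOf s [] = [] := by
  simp [breaksOf, PySem.List.enumerate]

theorem breaksOf_cons (s : Int) (pc : Int × Int) (p : List (Int × Int)) :
    breaksOf s (pc :: p) =
      if pc.2 = pc.1 + 1 then breaksOf (s + 1) p else s :: breaksOf (s + 1) p := by
  simp only [breaksOf, PySem.List.enumerate_cons, List.filterMap_cons]
  by_cases h : pc.2 = pc.1 + 1 <;> simp [h]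

theorem diffs_char (p : List (Int × Int)) : ∀ (s a : Int),
    diffs (a :: (breaksOf s p ++ [s + p.length])) =
      (s - a + (gpRun p).1 - 1) :: (gpRun p).2 := by
  induction p with
  | nil =>
    intro s a
    simp [breaksOf_nil, diffs, gpRun]
  | cons pc p ih =>
    intro s a
    rw [breaksOf_cons]
    by_cases h : pc.2 = pc.1 + 1
    · simp only [h, if_true, gpRun, List.length_cons]
      have harith : s + ((p.length : Int) + 1) = (s + 1) + p.length := by ring
      push_cast
      rw [harith, ih (s + 1) a]
      simp
      omega
    · simp only [if_neg h, gpRun, List.length_cons, List.cons_append]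
      have harith : s + ((p.length : Int) + 1) = (s + 1) + p.length := by ring
      push_cast
      rw [harith]
      show (s - a) :: diffs (s :: (breaksOf (s + 1) p ++ [(s + 1) + p.length])) = _
      rw [ih (s + 1) s]
      simp

theorem foldl_max_max (l : List Int) : ∀ a b : Int, l.foldl max (max a b) = max a (l.foldl max b) := by
  induction l with
  | nil => intro a b; rfl
  | cons x l ih =>
    intro a b
    simp only [List.foldl_cons]
    rw [max_assoc, ih a (max b x)]

theorem le_foldl_max (l : List Int) : ∀ a : Int, a ≤ l.foldl max a := by
  induction l with
  | nil => intro a; exact le_refl a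
  | cons x l ih =>
    intro a
    exact le_trans (le_max_left a x) (ih (max a x))

theorem gpRun_fst_pos (p : List (Int × Int)) : 1 ≤ (gpRun p).1 := by
  induction p with
  | nil => exact le_refl 1
  | cons pc p ih =>
    simp only [gpRun]
    split_ifs <;> omega

theorem mainA (p : List (Int × Int)) : ∀ (l c : Int),
    max (p.foldl
        (fun (st : Int × Int) pc =>
          if pc.2 = pc.1 + 1 then (st.1, st.2 + 1) else (max st.1 st.2, 1)) (l, c)).1
      (p.foldl
        (fun (st : Int × Int) pc =>
          if pc.2 = pc.1 + 1 then (st.1, st.2 + 1) else (max st.1 st.2, 1)) (l, c)).2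
      = max l (List.foldl max (c - 1 + (gpRun p).1) (gpRun p).2) := by
  induction p with
  | nil =>
    intro l c
    simp [gpRun]
  | cons pc p ih =>
    intro l c
    simp only [List.foldl_cons, gpRun]
    by_cases h : pc.2 = pc.1 + 1
    · rw [if_pos h, if_pos h, ih l (c + 1)]
      rw [show c + 1 - 1 + (gpRun p).1 = c - 1 + ((gpRun p).1 + 1) from by ring]
    · rw [if_neg h, if_neg h, ih (max l c) 1]
      rw [show (1 : Int) - 1 + (gpRun p).1 = (gpRun p).1 from by ring,
        show c - 1 + 1 = c from by ring, List.foldl_cons,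
        foldl_max_max ((gpRun p).2) c (gpRun p).1, max_assoc]

-- ===== VERDICT (by name: the statement is the Claim_ definition above) =====
theorem compute_longest_run_py_spec : Claim_equal_compute_longest_run_py := by
  intro indices _
  show compute_longest_run_py indices = compute_longest_run_py_alt indices
  cases indices with
  | nil => rfl
  | cons x rest =>
    have hne : x :: rest ≠ ([] : List Int) := by simp
    have hn : ¬((x :: rest).length : Int) = 0 := by
      simp only [List.length_cons]
      push_cast
      omega
    simp only [compute_longest_run_py, compute_longest_run_py_alt, if_neg hne, if_neg hn,
      PySem.List.slice_from_one]
    rw [mainA]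
    rw [show ((PySem.List.enumerate ((x :: rest).zip (x :: rest).tail) 1).filterMap
          (fun je => if je.2.2 ≠ je.2.1 + 1 then some je.1 else none)) =
        breaksOf 1 ((x :: rest).zip (x :: rest).tail) from rfl]
    set pairs := (x :: rest).zip (x :: rest).tail with hpairs
    rw [zip_diffs]
    have hlen : ((x :: rest).length : Int) = 1 + (pairs.length : Int) := by
      simp [hpairs, List.length_zip]
      omega
    rw [hlen, diffs_char pairs 1 0]
    have hg : (1 : Int) - 0 + (gpRun pairs).1 - 1 = (gpRun pairs).1 := by ring
    have h1 : (1 : Int) - 1 + (gpRun pairs).1 = (gpRun pairs).1 := by ring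
    rw [hg, h1]
    have hge : (1 : Int) ≤ List.foldl max (gpRun pairs).1 (gpRun pairs).2 :=
      le_trans (gpRun_fst_pos pairs) (le_foldl_max _ _)
    exact max_eq_right hge
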